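-- pv_equiv track=rewrite | github.com/CWS24-hub/Ozlink-Universal-File-Relocator | tests/test_pilot_dependency_scope_concrete_example.py | _merge_shallow_and_expanded
-- ===== SOURCE A (Python) =====
-- def _norm_identity_dir(path: str) -> str:
--     return str(path or "").replace("/", "\\").strip().rstrip("\\")
--
-- def _merge_shallow_and_expanded(shallow: list[str], expanded: list[str]) -> list[str]:
--     merge_seen: set[str] = set()
--     merged: list[str] = []
--     for src_list in (shallow, expanded):
--         for p in src_list:
--             ps = str(p or "").strip()
--             if not ps:
--                 continue
--             lk = ps.lower()
--             if lk in merge_seen: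
--                 continue
--             merge_seen.add(lk)
--             merged.append(ps)
--     merged.sort(key=lambda path: len([x for x in _norm_identity_dir(path).split("\\") if x]))
--     return merged
-- ===== SOURCE B (Python) =====
-- def _norm_identity_dir(path: str) -> str:
--     return str(path or "").replace("/", "\\").strip().rstrip("\\")
--
-- def _depth(path: str) -> int:
--     return len([x for x in _norm_identity_dir(path).split("\\") if x])
--
-- def _merge_shallow_and_expanded(shallow: list[str], expanded: list[str]) -> list[str]:
--     # Dedup via a single dict keyed by the lowercased string (first value wins),
--     # then a stable counting/bucket sort by directory depth instead of list.sort.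
--     first_seen: dict[str, str] = {}
--     for p in shallow + expanded:
--         ps = str(p or "").strip()
--         if ps:
--             first_seen.setdefault(ps.lower(), ps)
--     merged = list(first_seen.values())
--     depths = [_depth(ps) for ps in merged]
--     buckets: list[list[str]] = [[] for _ in range(max(depths, default=0) + 1)]
--     for ps, d in zip(merged, depths):
--         buckets[d].append(ps)
--     return [p for bucket in buckets for p in bucket]
-- ===== Notes on version B (the rewrite author's own statement) =====
-- stated objective: alternative
-- what changed: B replaces A's set-plus-list dedup by a single dict keyed by the lowercased string (setdefault keeps the first-seen spelling) and replaces A's comparison sort by a stable counting/bucket sort: each path is appended to the bucket of its directory depth and buckets are concatenated from depth 0 up.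
import Mathlib
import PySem

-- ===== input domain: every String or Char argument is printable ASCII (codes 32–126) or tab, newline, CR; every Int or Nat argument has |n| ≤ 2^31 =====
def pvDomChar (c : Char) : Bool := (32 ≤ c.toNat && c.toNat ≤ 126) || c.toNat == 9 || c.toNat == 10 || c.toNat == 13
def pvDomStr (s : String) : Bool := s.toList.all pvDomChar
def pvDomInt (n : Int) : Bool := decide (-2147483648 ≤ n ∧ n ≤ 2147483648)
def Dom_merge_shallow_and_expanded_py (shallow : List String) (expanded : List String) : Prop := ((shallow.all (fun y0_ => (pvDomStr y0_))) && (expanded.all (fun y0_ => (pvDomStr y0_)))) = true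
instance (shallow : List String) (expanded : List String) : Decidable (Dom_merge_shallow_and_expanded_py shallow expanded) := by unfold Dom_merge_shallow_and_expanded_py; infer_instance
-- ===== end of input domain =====

-- B replaces A's set+list dedup by one dict keyed by the lowercased string and A's
-- comparison sort by a stable counting/bucket sort over directory depths (objective: alternative).

-- ===== PORT A =====
-- _norm_identity_dir; rstrip("\\") has no PySem primitive, ported by hand as
-- dropping trailing '\' characters (exact: rstrip(chars) removes exactly those).
def normIdentityDir (path : String) : String :=
  String.ofList (((PySem.Str.strip (PySem.Str.replace path "/" "\\")).toList.reverse.dropWhile (fun c => c == '\\')).reverse)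

-- the sort key: len([x for x in _norm_identity_dir(path).split("\\") if x])
-- split("\\") has a non-empty separator, so Python never raises: split? is `some`, getD [] never fires.
def depthKey (path : String) : Nat :=
  (((PySem.Str.split? (normIdentityDir path) "\\").getD []).filter (fun x => x != "")).length

-- body of A's inner loop over one source list, state = (merge_seen, merged)
def mergeStepA (st : PySem.Set String × List String) (p : String) : PySem.Set String × List String :=
  let ps := PySem.Str.strip p        -- str(p or "").strip(); p or "" = p on strings
  if ps = "" then st
  else
    let lk := PySem.Str.lower ps
    if PySem.Set.contains st.1 lk then st
    else (PySem.Set.add st.1 lk, st.2 ++ [ps])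

def merge_shallow_and_expanded_py (shallow : List String) (expanded : List String) : List String :=
  let st := shallow.foldl mergeStepA (PySem.Set.empty, [])
  let st := expanded.foldl mergeStepA st
  PySem.List.sorted st.2 depthKey false

-- ===== PORT B =====
-- first_seen.setdefault(ps.lower(), ps) guarded by 'if ps'
def mergeStepB (fs : PySem.Dict String String) (p : String) : PySem.Dict String String :=
  let ps := PySem.Str.strip p
  if ps = "" then fs
  else fs.setdefault (PySem.Str.lower ps) ps

def merge_shallow_and_expanded_py_alt (shallow : List String) (expanded : List String) : List String :=
  let firstSeen := (shallow ++ expanded).foldl mergeStepB PySem.Dict.empty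
  let merged := firstSeen.values
  let depths := merged.map depthKey
  let buckets0 := (List.range ((PySem.List.max? depths (fun d => d)).getD 0 + 1)).map (fun _ => ([] : List String))
  let buckets := (merged.zip depths).foldl (fun bs pd => bs.set pd.2 (bs[pd.2]! ++ [pd.1])) buckets0
  buckets.flatten

-- ===== PRECONDITION & SPEC =====
def Spec_merge_shallow_and_expanded_py (shallow : List String) (expanded : List String) (out : List String) : Prop := out = merge_shallow_and_expanded_py_alt shallow expanded
instance (shallow : List String) (expanded : List String) (out : List String) : Decidable (Spec_merge_shallow_and_expanded_py shallow expanded out) := by unfold Spec_merge_shallow_and_expanded_py; infer_instance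

-- ===== CLAIM (what is proved, stated in full; the proofs are below) =====
def Claim_equal_merge_shallow_and_expanded_py : Prop := ∀ (shallow : List String) (expanded : List String), Dom_merge_shallow_and_expanded_py shallow expanded → Spec_merge_shallow_and_expanded_py shallow expanded (merge_shallow_and_expanded_py shallow expanded)

-- ===== LEMMAS AND PROOFS =====

-- the buckets as mathematical objects: bucket d = elements of depth d in first-seen order
def bucketize {α : Type} (k : α → Nat) (N : Nat) (l : List α) : List (List α) :=
  (List.range (N+1)).map (fun d => l.filter (fun x => k x == d))

-- dedup invariant: B's dict items are exactly A's merged list tagged with lowercase keys,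
-- and A's seen-set is the list of those lowercase keys
theorem dedup_invariant (l : List String) :
    (l.foldl mergeStepB PySem.Dict.empty).items
      = (l.foldl mergeStepA (PySem.Set.empty, [])).2.map (fun ps => (PySem.Str.lower ps, ps))
    ∧ (l.foldl mergeStepA (PySem.Set.empty, [])).1
      = (l.foldl mergeStepA (PySem.Set.empty, [])).2.map PySem.Str.lower := by
  induction l using List.reverseRecOn with
  | nil => exact ⟨rfl, rfl⟩
  | append_singleton l p ih =>
    obtain ⟨h1, h2⟩ := ih
    rw [List.foldl_append, List.foldl_append]
    simp only [List.foldl_cons, List.foldl_nil]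
    set dB := l.foldl mergeStepB PySem.Dict.empty with hdB
    set stA := l.foldl mergeStepA (PySem.Set.empty, []) with hstA
    dsimp only [mergeStepA, mergeStepB]
    by_cases hps : PySem.Str.strip p = ""
    · simp only [hps, if_pos rfl]
      exact ⟨h1, h2⟩
    · rw [if_neg hps, if_neg hps]
      have hkeys : dB.keys = stA.2.map PySem.Str.lower := by
        simp only [PySem.Dict.keys, h1, List.map_map]
        rfl
      by_cases hmem : PySem.Str.lower (PySem.Str.strip p) ∈ stA.1
      · have hcA : PySem.Set.contains stA.1 (PySem.Str.lower (PySem.Str.strip p)) = true :=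
          (PySem.Set.contains_iff _ _).mpr hmem
        have hcB : dB.contains (PySem.Str.lower (PySem.Str.strip p)) = true :=
          (PySem.Dict.contains_iff_mem_keys _ _).mpr (by rw [hkeys, ← h2]; exact hmem)
        rw [PySem.Dict.setdefault_of_contains _ _ hcB]
        simp only [hcA, if_pos rfl]
        exact ⟨h1, h2⟩
      · have hcA : PySem.Set.contains stA.1 (PySem.Str.lower (PySem.Str.strip p)) = false :=
          Bool.eq_false_iff.mpr (fun hc => hmem ((PySem.Set.contains_iff _ _).mp hc))
        have hcB : dB.contains (PySem.Str.lower (PySem.Str.strip p)) = false :=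
          Bool.eq_false_iff.mpr (fun hc => hmem (by
            have := (PySem.Dict.contains_iff_mem_keys _ _).mp hc
            rw [hkeys, ← h2] at this
            exact this))
        rw [PySem.Dict.setdefault_of_not_contains _ _ hcB]
        simp only [hcA, Bool.false_eq_true, if_false]
        constructor
        · rw [PySem.Dict.items_insert_of_not_contains _ _ hcB, h1]
          simp
        · simp only [PySem.Set.add, hcA, Bool.false_eq_true, if_false, h2]
          simp
          intro x hx heq
          apply hmem
          rw [h2, ← heq]
          exact List.mem_map_of_mem hx

theorem values_eq_merged (l : List String) :
    (l.foldl mergeStepB PySem.Dict.empty).values = (l.foldl mergeStepA (PySem.Set.empty, [])).2 := by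
  simp only [PySem.Dict.values, (dedup_invariant l).1, List.map_map]
  exact List.map_id'' (fun x => rfl) _

-- set on a map-over-range is a pointwise update
theorem set_map_range {α : Type} (g : Nat → α) (n i : Nat) (hi : i < n) (v : α) :
    ((List.range n).map g).set i v = (List.range n).map (fun d => if d = i then v else g d) := by
  apply List.ext_getElem
  · simp
  · intro j h1 h2
    simp only [List.getElem_set, List.getElem_map, List.getElem_range] at *
    by_cases hj : j = i
    · simp [hj]
    · simp [hj, show ¬ i = j from fun h => hj h.symm]

-- the bucket-filling fold computes bucketize
theorem bucket_fold {α : Type} [Inhabited α] (k : α → Nat) (N : Nat) (ms : List α)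
    (h : ∀ x ∈ ms, k x ≤ N) (g : Nat → List α) :
    (ms.zip (ms.map k)).foldl (fun bs pd => bs.set pd.2 (bs[pd.2]! ++ [pd.1]))
        ((List.range (N+1)).map g)
      = (List.range (N+1)).map (fun d => g d ++ ms.filter (fun x => k x == d)) := by
  induction ms generalizing g with
  | nil => simp
  | cons x t ih =>
    simp only [List.map_cons, List.zip_cons_cons, List.foldl_cons]
    have hx : k x ≤ N := h x (by simp)
    have hidx : k x < N + 1 := by omega
    have hget : ((List.range (N+1)).map g)[k x]! = g (k x) := by
      have h9 : ((List.range (N+1)).map g)[k x]? = some (g (k x)) := by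
        simp [List.getElem?_map, List.getElem?_range, hidx]
      simp [List.getElem!_eq_getElem?_getD, h9]
    rw [hget, set_map_range g (N+1) (k x) hidx]
    rw [ih (fun y hy => h y (by simp [hy])) (fun d => if d = k x then g (k x) ++ [x] else g d)]
    apply List.map_congr_left
    intro d hd
    by_cases hdk : d = k x
    · simp [hdk, List.filter_cons]
    · simp [hdk, List.filter_cons, show ¬ k x = d from fun hh => hdk hh.symm]

theorem insertBy_middle {α : Type} (before : α → α → Bool) (x : α) (A B : List α)
    (hA : ∀ y ∈ A, before x y = false) (hB : ∀ y ∈ B, before x y = true) :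
    PySem.List.insertBy before x (A ++ B) = A ++ x :: B := by
  induction A with
  | nil =>
    cases B with
    | nil => rfl
    | cons y ys =>
      have := hB y (by simp)
      simp [PySem.List.insertBy, this]
  | cons a A ih =>
    have ha := hA a (by simp)
    simp only [List.cons_append, PySem.List.insertBy, ha]
    rw [ih (fun y hy => hA y (by simp [hy]))]
    simp

-- A's stable sort is the concatenation of the depth buckets
theorem sorted_eq_bucketize {α : Type} (k : α → Nat) (N : Nat) (l : List α)
    (h : ∀ x ∈ l, k x ≤ N) :
    PySem.List.sorted l k false = (bucketize k N l).flatten := by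
  induction l using List.reverseRecOn with
  | nil =>
    simp [PySem.List.sorted_eq_foldl_insertBy, bucketize, List.flatten_eq_nil_iff]
  | append_singleton l x ih =>
    have hbound : ∀ y ∈ l, k y ≤ N := fun y hy => h y (by simp [hy])
    have hK : k x ≤ N := h x (by simp)
    rw [PySem.List.sorted_eq_foldl_insertBy, List.foldl_append]
    simp only [List.foldl_cons, List.foldl_nil]
    rw [← PySem.List.sorted_eq_foldl_insertBy, ih hbound]
    have hsplit : List.range (N+1) = List.range (k x + 1) ++ (List.range (N - k x)).map (fun j => (k x + 1) + j) := by
      rw [← List.range_add]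
      congr 1
      omega
    have hA : ∀ y ∈ ((List.range (k x + 1)).map (fun d => l.filter (fun z => k z == d))).flatten,
        (decide (k x < k y)) = false := by
      intro y hy
      simp only [List.mem_flatten, List.mem_map] at hy
      obtain ⟨sub, ⟨d, hd, rfl⟩, hysub⟩ := hy
      simp only [List.mem_range] at hd
      have : k y = d := by
        simp only [List.mem_filter, beq_iff_eq] at hysub
        exact hysub.2
      simp only [decide_eq_false_iff_not]
      omega
    have hB : ∀ y ∈ (((List.range (N - k x)).map (fun j => (k x + 1) + j)).map (fun d => l.filter (fun z => k z == d))).flatten,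
        (decide (k x < k y)) = true := by
      intro y hy
      simp only [List.mem_flatten, List.mem_map] at hy
      obtain ⟨sub, ⟨d, ⟨j, hj, rfl⟩, rfl⟩, hysub⟩ := hy
      have : k y = k x + 1 + j := by
        simp only [List.mem_filter, beq_iff_eq] at hysub
        exact hysub.2
      simp only [decide_eq_true_eq]
      omega
    unfold bucketize
    rw [hsplit, List.map_append, List.flatten_append, List.map_append, List.flatten_append]
    rw [insertBy_middle _ x _ _ hA hB]
    have hupper : ((List.range (N - k x)).map (fun j => (k x + 1) + j)).map (fun d => (l ++ [x]).filter (fun z => k z == d))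
        = ((List.range (N - k x)).map (fun j => (k x + 1) + j)).map (fun d => l.filter (fun z => k z == d)) := by
      apply List.map_congr_left
      intro d hd
      simp only [List.mem_map, List.mem_range] at hd
      obtain ⟨j, hj, rfl⟩ := hd
      rw [List.filter_append]
      have : (k x == k x + 1 + j) = false := by
        simp only [beq_eq_false_iff_ne, ne_eq]
        omega
      simp [List.filter_cons, this]
    have hlower : (List.range (k x + 1)).map (fun d => (l ++ [x]).filter (fun z => k z == d))
        = ((List.range (k x)).map (fun d => l.filter (fun z => k z == d))) ++ [l.filter (fun z => k z == k x) ++ [x]] := by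
      rw [List.range_succ, List.map_append]
      congr 1
      · apply List.map_congr_left
        intro d hd
        simp only [List.mem_range] at hd
        rw [List.filter_append]
        have : (k x == d) = false := by
          simp only [beq_eq_false_iff_ne, ne_eq]
          omega
        simp [List.filter_cons, this]
      · rw [List.map_singleton, List.filter_append]
        simp [List.filter_cons]
    rw [hupper, hlower]
    rw [List.range_succ, List.map_append, List.flatten_append, List.flatten_append]
    simp [List.append_assoc]

theorem merge_eq (shallow expanded : List String) :
    merge_shallow_and_expanded_py shallow expanded
      = merge_shallow_and_expanded_py_alt shallow expanded := by
  dsimp only [merge_shallow_and_expanded_py, merge_shallow_and_expanded_py_alt]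
  rw [← List.foldl_append, values_eq_merged]
  set ms := ((shallow ++ expanded).foldl mergeStepA (PySem.Set.empty, [])).2 with hms
  set N := (PySem.List.max? (ms.map depthKey) (fun d => d)).getD 0 with hN
  have hb : ∀ y ∈ ms, depthKey y ≤ N := by
    intro y hy
    cases hm : PySem.List.max? (ms.map depthKey) (fun d => d) with
    | none =>
      rw [PySem.List.max?_eq_none_iff, List.map_eq_nil_iff] at hm
      rw [hm] at hy
      exact absurd hy (List.not_mem_nil)
    | some m =>
      have := PySem.List.max?_isMax hm (depthKey y) (List.mem_map_of_mem hy)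
      rw [hN, hm]
      exact this
  rw [bucket_fold depthKey N ms hb (fun _ => [])]
  rw [sorted_eq_bucketize depthKey N ms hb]
  unfold bucketize
  simp

-- ===== VERDICT (by name: the statement is the Claim_ definition above) =====
theorem merge_shallow_and_expanded_py_spec : Claim_equal_merge_shallow_and_expanded_py := by
  intro shallow expanded _
  unfold Spec_merge_shallow_and_expanded_py
  exact merge_eq shallow expanded
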